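-- pv_equiv track=rewrite | github.com/pypi-data/pypi-mirror-390 | packages/merlinquantum/merlinquantum-0.2.3-py3-none-any.whl/merlin/core/generators.py | _generate_periodic_state
-- ===== SOURCE A (Python) =====
-- def _generate_periodic_state(n_modes, n_photons):
--     """Generate a state with periodically placed photons."""
--     bits = [1 if i % 2 == 0 else 0 for i in range(min(n_photons * 2, n_modes))]
--     count = sum(bits)
--     i = 0
--     while count < n_photons and i < n_modes:
--         if i >= len(bits):
--             bits.append(0)
--         if bits[i] == 0:
--             bits[i] = 1
--             count += 1
--         i += 1
--     padding = [0] * (n_modes - len(bits))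
--     return bits + padding
-- ===== SOURCE B (Python) =====
-- def _generate_periodic_state(n_modes, n_photons):
--     """Generate a state with periodically placed photons."""
--     result = [0] * max(n_modes, 0)
--     order = list(range(0, n_modes, 2)) + list(range(1, n_modes, 2))
--     cap = max(min(n_photons, n_modes), 0)
--     for p in order[:cap]:
--         result[p] = 1
--     return result
-- ===== Notes on version B (the rewrite author's own statement) =====
-- stated objective: simpler
-- what changed: Replaces A's three phases (build an alternating prefix, while-loop that appends/fills gaps while counting, then pad) by allocating the zero list up front and setting 1 at the first cap positions of an explicit evens-then-odds priority order.
import Mathlib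
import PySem

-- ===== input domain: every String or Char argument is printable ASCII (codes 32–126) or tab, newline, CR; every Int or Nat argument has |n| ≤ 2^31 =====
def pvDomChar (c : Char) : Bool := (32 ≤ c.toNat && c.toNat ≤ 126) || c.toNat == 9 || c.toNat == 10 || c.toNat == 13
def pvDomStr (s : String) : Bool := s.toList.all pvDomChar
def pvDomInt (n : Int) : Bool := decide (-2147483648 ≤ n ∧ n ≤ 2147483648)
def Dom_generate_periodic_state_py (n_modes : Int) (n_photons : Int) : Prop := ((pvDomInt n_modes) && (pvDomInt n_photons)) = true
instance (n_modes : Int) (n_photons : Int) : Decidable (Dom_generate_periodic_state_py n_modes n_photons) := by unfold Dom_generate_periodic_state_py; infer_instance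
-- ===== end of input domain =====

-- B replaces A's build-then-gap-fill-then-pad phases by one zero list and an explicit
-- evens-then-odds placement order (objective: simpler); same return value everywhere.

-- ===== PORT A =====
-- the while loop: state (bits, count, i); indexing is always in range in Python, so
-- bits[i] is pyGetD and bits[i]=1 is pySetD (exact on the reachable states)
def pyLoopA (n_modes : Int) (n_photons : Int) (bits : List Int) (count : Int) (i : Int) :
    List Int :=
  if h : count < n_photons ∧ i < n_modes then
    let bits1 := if (bits.length : Int) ≤ i then bits ++ [0] else bits
    if PySem.List.pyGetD bits1 i 0 == 0 then
      pyLoopA n_modes n_photons (PySem.List.pySetD bits1 i 1) (count + 1) (i + 1)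
    else
      pyLoopA n_modes n_photons bits1 count (i + 1)
  else bits
termination_by (n_modes - i).toNat
decreasing_by all_goals omega

def generate_periodic_state_py (n_modes : Int) (n_photons : Int) : List Int :=
  let bits := (PySem.List.pyRange 0 (min (n_photons * 2) n_modes) 1).map
    (fun i => if PySem.Int.mod i 2 == 0 then (1 : Int) else 0)
  let count := bits.sum
  let bits' := pyLoopA n_modes n_photons bits count 0
  bits' ++ List.replicate (n_modes - (bits'.length : Int)).toNat 0

-- ===== PORT B =====
def generate_periodic_state_py_alt (n_modes : Int) (n_photons : Int) : List Int :=
  let result := List.replicate (max n_modes 0).toNat (0 : Int)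
  let order := PySem.List.pyRange 0 n_modes 2 ++ PySem.List.pyRange 1 n_modes 2
  let cap := max (min n_photons n_modes) 0
  (PySem.List.slice order none (some cap)).foldl
    (fun r p => PySem.List.pySetD r p 1) result

-- ===== PRECONDITION & SPEC =====
def Spec_generate_periodic_state_py (n_modes : Int) (n_photons : Int) (out : List Int) : Prop := out = generate_periodic_state_py_alt n_modes n_photons
instance (n_modes : Int) (n_photons : Int) (out : List Int) : Decidable (Spec_generate_periodic_state_py n_modes n_photons out) := by unfold Spec_generate_periodic_state_py; infer_instance

-- ===== CLAIM (what is proved, stated in full; the proofs are below) =====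
def Claim_equal_generate_periodic_state_py : Prop := ∀ (n_modes : Int) (n_photons : Int), Dom_generate_periodic_state_py n_modes n_photons → Spec_generate_periodic_state_py n_modes n_photons (generate_periodic_state_py n_modes n_photons)

-- ===== LEMMAS AND PROOFS =====

-- the common pointwise description both programs are reduced to:
-- position j (j < N) carries a photon iff its rank in the evens-then-odds order is < cap
def pvSpecList (n_modes : Int) (n_photons : Int) : List Int :=
  let N := (max n_modes 0).toNat
  let K := (max (min n_photons n_modes) 0).toNat
  (List.range N).map
    (fun j => if (if j % 2 = 0 then j / 2 else (N + 1) / 2 + j / 2) < K then (1 : Int) else 0)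


def pvAltBits (L : Nat) : List Int :=
  (List.range L).map (fun k => if k % 2 = 0 then (1 : Int) else 0)

theorem pvAltBits_len (L : Nat) : (pvAltBits L).length = L := by
  simp [pvAltBits]

theorem bits0_eq (m : Int) :
    (PySem.List.pyRange 0 m 1).map (fun i => if PySem.Int.mod i 2 == 0 then (1 : Int) else 0)
      = pvAltBits m.toNat := by
  rw [PySem.List.pyRange_one, List.map_map, pvAltBits]
  have hm : (m - 0).toNat = m.toNat := by omega
  rw [hm]
  apply List.map_congr_left
  intro k _
  simp only [Function.comp, zero_add]
  rw [PySem.Int.mod_eq_emod_of_pos (by norm_num : (0:Int) < 2)]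
  have : (((k : Int) % 2 == 0)) = (k % 2 == 0) := by
    by_cases h : k % 2 = 0 <;> simp [h] <;> omega
  rw [this]
  by_cases h : k % 2 = 0 <;> simp [h]

theorem pvAltBits_sum (L : Nat) : (pvAltBits L).sum = (((L + 1) / 2 : Nat) : Int) := by
  induction L with
  | zero => simp [pvAltBits]
  | succ L ih =>
    rw [pvAltBits, List.range_succ, List.map_append, List.sum_append]
    rw [show (List.range L).map (fun k => if k % 2 = 0 then (1:Int) else 0) = pvAltBits L from rfl, ih]
    by_cases h : L % 2 = 0 <;> simp [h] <;> omega

theorem pvAltBits_get (L j : Nat) (hj : j < L) :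
    (pvAltBits L)[j]'(by simpa [pvAltBits_len]) = if j % 2 = 0 then (1 : Int) else 0 := by
  simp [pvAltBits]

theorem loopA_char (np : Int) (N : Nat) :
    ∀ (d i : Nat) (bits : List Int), i + d = N → bits.length = N →
    (∀ (j : Nat) (hj : j < bits.length), bits[j] = (if j % 2 = 0 ∨ j < i then (1 : Int) else 0)) →
    pyLoopA (N : Int) np bits ((((N + 1) / 2 + i / 2 : Nat) : Int)) (i : Int) =
      (List.range N).map
        (fun j => if j % 2 = 0 ∨ j < i ∨ ((((N + 1) / 2 + j / 2 : Nat) : Int) < np)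
          then (1 : Int) else 0) := by
  intro d
  induction d with
  | zero =>
    intro i bits hiN hlen hbits
    have hi : i = N := by omega
    rw [pyLoopA, dif_neg (by omega)]
    apply List.ext_getElem (by simp [hlen])
    intro j hj1 hj2
    simp only [List.getElem_map, List.getElem_range]
    rw [hbits j hj1]
    have hjN : j < N := by simpa [hlen] using hj1
    simp [hi, hjN]
  | succ d ih =>
    intro i bits hiN hlen hbits
    have hiN' : i < N := by omega
    rw [pyLoopA]
    by_cases hc : ((((N + 1) / 2 + i / 2 : Nat) : Int)) < np
    · rw [dif_pos ⟨hc, by omega⟩]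
      have hb1 : ¬ ((bits.length : Int) ≤ (i : Int)) := by omega
      have hget : PySem.List.pyGetD bits (i : Int) 0 = bits[i]'(by omega) := by
        rw [PySem.List.pyGetD_natCast, List.getD_eq_getElem _ _ (by omega)]
      simp only [if_neg hb1]
      rw [hget, hbits i (by omega)]
      by_cases hpar : i % 2 = 0
      · rw [if_pos (Or.inl hpar)]
        simp only [show ((1:Int) == 0) = false from rfl, Bool.false_eq_true, if_false]
        have hcast : ((i : Int)) + 1 = ((i + 1 : Nat) : Int) := by omega
        have hcnt : ((((N + 1) / 2 + i / 2 : Nat) : Int)) = (((N + 1) / 2 + (i + 1) / 2 : Nat) : Int) := by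
          omega
        rw [hcast, hcnt, ih (i + 1) bits (by omega) hlen ?hb]
        case hb =>
          intro j hj
          rw [hbits j hj]
          have hjN : j < N := by omega
          exact if_congr (by omega) rfl rfl
        apply List.map_congr_left
        intro j hj
        simp only [List.mem_range] at hj
        by_cases hC : ((((N + 1) / 2 + j / 2 : Nat) : Int)) < np <;>
          · exact if_congr (by omega) rfl rfl
      · rw [if_neg (show ¬(i % 2 = 0 ∨ i < i) by omega)]
        simp only [show ((0:Int) == 0) = true from rfl, if_true]
        rw [PySem.List.pySetD_natCast]
        have hcast : ((i : Int)) + 1 = ((i + 1 : Nat) : Int) := by omega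
        have hcnt : ((((N + 1) / 2 + i / 2 : Nat) : Int)) + 1 = (((N + 1) / 2 + (i + 1) / 2 : Nat) : Int) := by
          omega
        rw [hcast, hcnt, ih (i + 1) (bits.set i 1) (by omega) (by simp [hlen]) ?hb2]
        case hb2 =>
          intro j hj
          rw [List.getElem_set]
          have hj' : j < bits.length := by simpa using hj
          by_cases hji : i = j
          · rw [if_pos hji, if_pos (by omega)]
          · rw [if_neg hji, hbits j hj']
            exact if_congr (by omega) rfl rfl
        apply List.map_congr_left
        intro j hj
        simp only [List.mem_range] at hj
        by_cases hC : ((((N + 1) / 2 + j / 2 : Nat) : Int)) < np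
        · exact if_congr (by constructor <;> intro <;> omega) rfl rfl
        · exact if_congr (by omega) rfl rfl
    · rw [dif_neg (by intro h; exact hc h.1)]
      apply List.ext_getElem (by simp [hlen])
      intro j hj1 hj2
      simp only [List.getElem_map, List.getElem_range]
      rw [hbits j hj1]
      by_cases hje : j % 2 = 0
      · simp [hje]
      · have hjN : j < N := by simpa [hlen] using hj1
        by_cases hji : j < i
        · simp [hje, hji]
        · rw [if_neg (by omega),
            if_neg (show ¬(j % 2 = 0 ∨ j < i ∨ ((((N + 1) / 2 + j / 2 : Nat) : Int) < np)) by omega)]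

theorem foldl_set_getElem? (ps : List Nat) (r : List Int) (j : Nat) :
    (ps.foldl (fun (r : List Int) p => r.set p 1) r)[j]? =
      if j ∈ ps ∧ j < r.length then some 1 else r[j]? := by
  induction ps generalizing r with
  | nil => simp
  | cons p ps ih =>
    simp only [List.foldl_cons, ih, List.length_set, List.mem_cons, List.getElem?_set]
    by_cases hp : p = j <;> by_cases hm : j ∈ ps <;> by_cases hl : j < r.length <;>
      first
      | (simp [hp, hm, hl]; omega)
      | simp [hp, hm, hl]


theorem alt_eq_spec (n_modes n_photons : Int) :
    generate_periodic_state_py_alt n_modes n_photons = pvSpecList n_modes n_photons := by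
  set N := (max n_modes 0).toNat with hN
  set K := (max (min n_photons n_modes) 0).toNat with hK
  have hKN : K ≤ N := by omega
  have h1 : PySem.List.pyRange 0 n_modes 2 =
      ((List.range ((N + 1) / 2)).map (fun k => 2 * k)).map (fun n : Nat => (n : Int)) := by
    rw [PySem.List.pyRange_of_pos 0 n_modes (by norm_num)]
    have : (if (0:Int) < n_modes then ((n_modes - 0 + 2 - 1) / 2).toNat else 0) = (N + 1) / 2 := by
      split_ifs with h <;> omega
    rw [this, List.map_map]
    apply List.map_congr_left; intro k _; simp only [Function.comp]; push_cast; ring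
  have h2 : PySem.List.pyRange 1 n_modes 2 =
      ((List.range (N / 2)).map (fun k => 2 * k + 1)).map (fun n : Nat => (n : Int)) := by
    rw [PySem.List.pyRange_of_pos 1 n_modes (by norm_num)]
    have : (if (1:Int) < n_modes then ((n_modes - 1 + 2 - 1) / 2).toNat else 0) = N / 2 := by
      split_ifs with h <;> omega
    rw [this, List.map_map]
    apply List.map_congr_left; intro k _; simp only [Function.comp]; push_cast; ring
  have hcap : (0:Int) ≤ max (min n_photons n_modes) 0 := le_max_right _ _
  unfold generate_periodic_state_py_alt
  simp only [h1, h2, PySem.List.slice_to _ hcap]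
  rw [show (max (min n_photons n_modes) 0).toNat = K from rfl]
  rw [← List.map_append, ← List.map_take, List.foldl_map]
  simp only [PySem.List.pySetD_natCast]
  apply List.ext_getElem?
  intro j
  rw [foldl_set_getElem?, List.length_replicate]
  by_cases hj : j < N
  · have hmem : (j ∈ (List.take K ((List.range ((N+1)/2)).map (fun k => 2*k) ++
        (List.range (N/2)).map (fun k => 2*k+1)))) ↔
        (if j % 2 = 0 then j / 2 else (N + 1) / 2 + j / 2) < K := by
      rw [List.take_append, List.length_map, List.length_range, ← List.map_take, ← List.map_take,
        List.take_range, List.take_range]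
      simp only [List.mem_append, List.mem_map, List.mem_range]
      constructor
      · rintro (⟨k, hk, rfl⟩ | ⟨k, hk, rfl⟩)
        · rw [if_pos (by omega)]; omega
        · rw [if_neg (by omega)]; omega
      · intro h
        by_cases he : j % 2 = 0
        · rw [if_pos he] at h; exact Or.inl ⟨j / 2, by omega, by omega⟩
        · rw [if_neg he] at h; exact Or.inr ⟨j / 2, by omega, by omega⟩
    rw [pvSpecList]
    simp only [List.getElem?_map, List.getElem?_range (by rw [← hN]; exact hj : j < (max n_modes 0).toNat),
      Option.map_some, List.getElem?_replicate, hmem]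
    rw [← hN, ← hK]
    by_cases hlt : (if j % 2 = 0 then j / 2 else (N + 1) / 2 + j / 2) < K
    · simp [hlt, hj]
    · simp [hlt, hj]
  · rw [pvSpecList]
    have h1 : (List.range (max n_modes 0).toNat)[j]? = none := by
      rw [List.getElem?_eq_none]
      simp [List.length_range]
      omega
    simp only [List.getElem?_map, h1, Option.map_none, List.getElem?_replicate]
    rw [if_neg (by rw [← hN]; omega), if_neg (by omega)]

theorem a_eq_spec (nm np : Int) :
    generate_periodic_state_py nm np = pvSpecList nm np := by
  simp only [generate_periodic_state_py]
  rw [bits0_eq, pvAltBits_sum]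
  by_cases hsmall : np ≤ 0 ∨ nm ≤ 0
  · have hM0 : (min (np * 2) nm).toNat = 0 := by omega
    rw [hM0]
    rw [show pvAltBits 0 = [] from rfl]
    rw [pyLoopA, dif_neg (by omega)]
    rw [pvSpecList]
    have hK : (max (min np nm) 0).toNat = 0 := by omega
    rw [hK]
    simp only [Nat.not_lt_zero, if_false, List.map_const', List.length_range,
      List.nil_append, List.length_nil, Nat.cast_zero]
    rw [show (nm - 0).toNat = (max nm 0).toNat by omega]
  · have hnp : 0 < np := by omega
    have hnm : 0 < nm := by omega
    obtain ⟨N, rfl⟩ : ∃ n : Nat, nm = (n : Int) := ⟨nm.toNat, by omega⟩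
    by_cases hbig : np * 2 ≤ (N : Int)
    · -- the while loop is a no-op: count already equals n_photons
      rw [pyLoopA, dif_neg (by omega)]
      rw [pvSpecList, pvAltBits_len]
      apply List.ext_getElem
      · simp [pvAltBits_len]; omega
      intro j hj1 hj2
      simp only [List.getElem_map, List.getElem_range]
      by_cases hjL : j < (pvAltBits (min (np * 2) (N : Int)).toNat).length
      · rw [List.getElem_append_left hjL,
          pvAltBits_get _ j (by simpa [pvAltBits_len] using hjL)]
        rw [pvAltBits_len] at hjL
        split_ifs <;> omega
      · rw [List.getElem_append_right (by omega), List.getElem_replicate]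
        rw [pvAltBits_len] at hjL
        split_ifs <;> omega
    · -- the while loop runs from i = 0 on the full alternating list
      have hL : (min (np * 2) (N : Int)).toNat = N := by omega
      have happ := loopA_char np N N 0 (pvAltBits N) (by omega) (pvAltBits_len N) ?hb
      case hb =>
        intro j hj
        rw [pvAltBits_get N j (by simpa [pvAltBits_len] using hj)]
        exact if_congr (by omega) rfl rfl
      simp only [Nat.cast_zero, Nat.zero_div, Nat.add_zero] at happ
      rw [hL, happ]
    -- now both sides are maps over range N
      rw [pvSpecList]
      simp only [List.length_map, List.length_range]
      rw [show ((N : Int) - (N : Nat)).toNat = 0 by omega]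
      simp only [List.replicate_zero, List.append_nil]
      rw [show (max (N : Int) 0).toNat = N by omega]
      apply List.map_congr_left
      intro j hj
      simp only [List.mem_range] at hj
      split_ifs <;> omega

-- ===== VERDICT (by name: the statement is the Claim_ definition above) =====
theorem generate_periodic_state_py_spec : Claim_equal_generate_periodic_state_py := by
  intro nm np _
  unfold Spec_generate_periodic_state_py
  rw [a_eq_spec, alt_eq_spec]
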